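-- pv_equiv track=rewrite | github.com/doloadama/ODC-Python | ALGO-PYTHON/Exercice7.py | lettrem
-- ===== SOURCE A (Python) =====
-- def lettrem(phrase):
--     #Dictionnaires contenant les références en majuscules
--     lettres = {
--     "2": "A", "22": "B", "222": "C", "3": "D",
--     "33": "E", "333": "F", "4": "G", "44": "H",
--     "444": "I", "5": "J", "55": "K", "555": "L",
--     "6": "M", "66": "N", "666": "O", "7": "P",
--     "77": "Q", "777": "R", "7777": "S", "8": "T",
--     "88": "U", "888": "V", "9": "W", "99": "X",
--     "999": "Y", "9999": "Z", "0": " "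
-- }
--
--     #Dictionnaires contenant les références numériques
--     chiffres = {
--     "A": "0", "B": "1",
--     "C": "2", "D": "3",
--     "E": "4", "F": "5",
--     "G": "6", "H": "7",
--     "I": "8", "J": "9"
--     }
--     #Dictionnaires contenant les références de caractères spéciaux et espace
--     caracteres = {
--                   "*": "*", "#": "#"
--                  }
--
--     #Une boucle pour vérifier la correspondance dans les différents dictionnaires
--     traduction = ''
--     succession = ''
--     for carac in phrase.upper():
--         #variable qui prend chaque valeur afin de comparer au suivant
--         code = ''
--         if carac in lettres:
--             code += lettres[carac]
--         elif carac in chiffres: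
--             code += chiffres[carac]
--         elif carac in caracteres:
--             code += caracteres[carac]
--         else:
--             code = "0"
--
--         if code == succession:
--             traduction += "0" + code
--         else:
--             traduction += code
--
--         succession = code
--
--     return traduction
-- ===== SOURCE B (Python) =====
-- def lettrem(phrase):
--     # Arithmetic per-character coder (no dictionaries: only single-character keys
--     # can ever match one character) + run-grouping emission pass.
--     def code(c):
--         if '2' <= c <= '9':
--             return "ADGJMPTW"[ord(c) - ord('2')]
--         if c == '0':
--             return ' '
--         if 'A' <= c <= 'J':
--             return chr(ord('0') + ord(c) - ord('A'))
--         if c == '*' or c == '#':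
--             return c
--         return '0'
--     codes = [code(c) for c in phrase.upper()]
--     parts = []
--     i = 0
--     n = len(codes)
--     while i < n:
--         j = i + 1
--         while j < n and codes[j] == codes[i]:
--             j += 1
--         parts.append('0'.join(codes[i:j]))
--         i = j
--     return ''.join(parts)
-- ===== Notes on version B (the rewrite author's own statement) =====
-- stated objective: alternative
-- what changed: A's three-dictionary lookup cascade is replaced by closed-form arithmetic on the character's code point (only single-character keys can ever match one character), and A's single pass with a running succession accumulator is replaced by a two-pass structure: map every character to its code, then emit the codes run by run, joining each run of consecutive equal codes with zero-digit separators.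
import Mathlib
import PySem

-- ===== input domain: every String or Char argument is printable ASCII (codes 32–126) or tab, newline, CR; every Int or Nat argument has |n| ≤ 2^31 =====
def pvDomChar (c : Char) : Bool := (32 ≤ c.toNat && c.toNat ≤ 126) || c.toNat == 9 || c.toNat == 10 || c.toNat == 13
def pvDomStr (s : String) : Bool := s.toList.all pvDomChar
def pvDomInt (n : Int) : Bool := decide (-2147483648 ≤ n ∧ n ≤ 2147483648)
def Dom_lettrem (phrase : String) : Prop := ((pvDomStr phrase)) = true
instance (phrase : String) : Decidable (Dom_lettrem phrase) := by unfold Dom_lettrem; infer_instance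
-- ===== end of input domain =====

-- B replaces A's three-dictionary lookup cascade with a closed-form arithmetic
-- per-character coder (only single-character keys can ever match) and A's single
-- running-`succession` pass with a separate run-grouping emission pass
-- (objective: alternative decomposition).
-- ===== PORT A =====
-- the dict literal `lettres`
def pvLettres : PySem.Dict String String := PySem.Dict.mk
  [("2", "A"), ("22", "B"), ("222", "C"), ("3", "D"),
   ("33", "E"), ("333", "F"), ("4", "G"), ("44", "H"),
   ("444", "I"), ("5", "J"), ("55", "K"), ("555", "L"),
   ("6", "M"), ("66", "N"), ("666", "O"), ("7", "P"),
   ("77", "Q"), ("777", "R"), ("7777", "S"), ("8", "T"),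
   ("88", "U"), ("888", "V"), ("9", "W"), ("99", "X"),
   ("999", "Y"), ("9999", "Z"), ("0", " ")]

-- the dict literal `chiffres`
def pvChiffres : PySem.Dict String String := PySem.Dict.mk
  [("A", "0"), ("B", "1"), ("C", "2"), ("D", "3"), ("E", "4"),
   ("F", "5"), ("G", "6"), ("H", "7"), ("I", "8"), ("J", "9")]

-- the dict literal `caracteres`
def pvCarac : PySem.Dict String String := PySem.Dict.mk [("*", "*"), ("#", "#")]

-- the body of A's for-loop: state (traduction, succession); `carac in d` + `d[carac]`
-- is ported as a match on `d.get?` (the lookup cannot fail once `in` succeeded)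
def pvLoopA : List Char → String → String → String
  | [], trad, _succ => trad
  | carac :: rest, trad, succ =>
    let s := String.ofList [carac]
    let code : String :=
      match pvLettres.get? s with
      | some v => "" ++ v
      | none =>
        match pvChiffres.get? s with
        | some v => "" ++ v
        | none =>
          match pvCarac.get? s with
          | some v => "" ++ v
          | none => "0"
    let trad' := if code == succ then trad ++ ("0" ++ code) else trad ++ code
    pvLoopA rest trad' code

def lettrem (phrase : String) : String :=
  pvLoopA (PySem.Str.upper phrase).toList "" ""

-- ===== PORT B =====
-- Source B's inner `code(c)`: arithmetic on the code point, no dictionaries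
def pvCodeB (c : Char) : String :=
  if '2' ≤ c ∧ c ≤ '9' then
    -- "ADGJMPTW"[ord(c) - ord('2')]: the guard keeps the index in range, so
    -- the `none` (IndexError) arm is unreachable
    match PySem.Str.pyGet? "ADGJMPTW" ((c.toNat : Int) - ('2'.toNat : Int)) with
    | some ch => String.ofList [ch]
    | none => ""
  else if c = '0' then " "
  else if 'A' ≤ c ∧ c ≤ 'J' then
    -- chr(ord('0') + ord(c) - ord('A'))
    String.ofList [Char.ofNat ('0'.toNat + c.toNat - 'A'.toNat)]
  else if c = '*' ∨ c = '#' then String.ofList [c]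
  else "0"

-- Source B's outer while loop over runs: codes[i:j] is the head plus the following
-- codes equal to it (the inner `while j < n and codes[j] == codes[i]`)
def pvRuns : List String → List String
  | [] => []
  | c :: rest =>
    PySem.Str.join "0" (c :: rest.takeWhile (· == c)) :: pvRuns (rest.dropWhile (· == c))
  termination_by l => l.length
  decreasing_by
    have := List.length_dropWhile_le (· == c) rest
    simp only [List.length_cons]
    omega

def lettrem_alt (phrase : String) : String :=
  PySem.Str.join "" (pvRuns (((PySem.Str.upper phrase).toList).map pvCodeB))

-- ===== PRECONDITION & SPEC =====
def Spec_lettrem (phrase : String) (out : String) : Prop := out = lettrem_alt phrase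
instance (phrase : String) (out : String) : Decidable (Spec_lettrem phrase out) := by unfold Spec_lettrem; infer_instance

-- ===== CLAIM (what is proved, stated in full; the proofs are below) =====
def Claim_equal_lettrem : Prop := ∀ (phrase : String), Dom_lettrem phrase → Spec_lettrem phrase (lettrem phrase)

-- ===== LEMMAS AND PROOFS =====

-- A's per-character code computation, as a function
def pvCodeA (carac : Char) : String :=
  let s := String.ofList [carac]
  match pvLettres.get? s with
  | some v => "" ++ v
  | none =>
    match pvChiffres.get? s with
    | some v => "" ++ v
    | none =>
      match pvCarac.get? s with
      | some v => "" ++ v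
      | none => "0"

-- A's loop with the growing `traduction` stripped off the state
def pvEmit : List String → String → String
  | [], _ => ""
  | c :: cs, prev => (if c == prev then "0" ++ c else c) ++ pvEmit cs c

-- concatenation of a list of strings
def pvCat : List String → String
  | [] => ""
  | p :: ps => p ++ pvCat ps

-- concatenation of a list of strings, each preceded by "0"
def pvSeps : List String → String
  | [] => ""
  | r :: rs => ("0" ++ r) ++ pvSeps rs

theorem pvStrBeq (s t : String) : (s == t) = (s.toList == t.toList) := by
  rw [Bool.eq_iff_iff]
  simp [← String.toList_inj]

theorem pvCharLe (c d : Char) : c ≤ d ↔ c.toNat ≤ d.toNat := by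
  rw [Char.le_def, UInt32.le_iff_toNat_le]; exact Iff.rfl

theorem pvToNat_ne {c d : Char} (h : c ≠ d) : c.toNat ≠ d.toNat :=
  fun he => h (Char.ext (UInt32.toNat_inj.mp he))

-- the heart of the equivalence: A's dictionary cascade and B's arithmetic coder
-- agree on every character (multi-character keys never match a single character)
theorem pvCodeAB (c : Char) : pvCodeA c = pvCodeB c := by
  simp only [pvCodeA, pvLettres, pvChiffres, pvCarac, PySem.Dict.get?, List.find?, pvStrBeq,
    String.toList_ofList]
  simp
  rcases eq_or_ne c '2' with h | h0
  · subst h; rfl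
  simp only [beq_eq_false_iff_ne.mpr (Ne.symm h0)]
  rcases eq_or_ne c '3' with h | h1
  · subst h; rfl
  simp only [beq_eq_false_iff_ne.mpr (Ne.symm h1)]
  rcases eq_or_ne c '4' with h | h2
  · subst h; rfl
  simp only [beq_eq_false_iff_ne.mpr (Ne.symm h2)]
  rcases eq_or_ne c '5' with h | h3
  · subst h; rfl
  simp only [beq_eq_false_iff_ne.mpr (Ne.symm h3)]
  rcases eq_or_ne c '6' with h | h4
  · subst h; rfl
  simp only [beq_eq_false_iff_ne.mpr (Ne.symm h4)]
  rcases eq_or_ne c '7' with h | h5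
  · subst h; rfl
  simp only [beq_eq_false_iff_ne.mpr (Ne.symm h5)]
  rcases eq_or_ne c '8' with h | h6
  · subst h; rfl
  simp only [beq_eq_false_iff_ne.mpr (Ne.symm h6)]
  rcases eq_or_ne c '9' with h | h7
  · subst h; rfl
  simp only [beq_eq_false_iff_ne.mpr (Ne.symm h7)]
  rcases eq_or_ne c '0' with h | h8
  · subst h; rfl
  simp only [beq_eq_false_iff_ne.mpr (Ne.symm h8)]
  rcases eq_or_ne c 'A' with h | h9
  · subst h; rfl
  simp only [beq_eq_false_iff_ne.mpr (Ne.symm h9)]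
  rcases eq_or_ne c 'B' with h | h10
  · subst h; rfl
  simp only [beq_eq_false_iff_ne.mpr (Ne.symm h10)]
  rcases eq_or_ne c 'C' with h | h11
  · subst h; rfl
  simp only [beq_eq_false_iff_ne.mpr (Ne.symm h11)]
  rcases eq_or_ne c 'D' with h | h12
  · subst h; rfl
  simp only [beq_eq_false_iff_ne.mpr (Ne.symm h12)]
  rcases eq_or_ne c 'E' with h | h13
  · subst h; rfl
  simp only [beq_eq_false_iff_ne.mpr (Ne.symm h13)]
  rcases eq_or_ne c 'F' with h | h14
  · subst h; rfl
  simp only [beq_eq_false_iff_ne.mpr (Ne.symm h14)]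
  rcases eq_or_ne c 'G' with h | h15
  · subst h; rfl
  simp only [beq_eq_false_iff_ne.mpr (Ne.symm h15)]
  rcases eq_or_ne c 'H' with h | h16
  · subst h; rfl
  simp only [beq_eq_false_iff_ne.mpr (Ne.symm h16)]
  rcases eq_or_ne c 'I' with h | h17
  · subst h; rfl
  simp only [beq_eq_false_iff_ne.mpr (Ne.symm h17)]
  rcases eq_or_ne c 'J' with h | h18
  · subst h; rfl
  simp only [beq_eq_false_iff_ne.mpr (Ne.symm h18)]
  rcases eq_or_ne c '*' with h | h19
  · subst h; rfl
  simp only [beq_eq_false_iff_ne.mpr (Ne.symm h19)]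
  rcases eq_or_ne c '#' with h | h20
  · subst h; rfl
  simp only [beq_eq_false_iff_ne.mpr (Ne.symm h20)]
  have n0 : c.toNat ≠ 50 := pvToNat_ne h0
  have n1 : c.toNat ≠ 51 := pvToNat_ne h1
  have n2 : c.toNat ≠ 52 := pvToNat_ne h2
  have n3 : c.toNat ≠ 53 := pvToNat_ne h3
  have n4 : c.toNat ≠ 54 := pvToNat_ne h4
  have n5 : c.toNat ≠ 55 := pvToNat_ne h5
  have n6 : c.toNat ≠ 56 := pvToNat_ne h6
  have n7 : c.toNat ≠ 57 := pvToNat_ne h7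
  have n8 : c.toNat ≠ 48 := pvToNat_ne h8
  have n9 : c.toNat ≠ 65 := pvToNat_ne h9
  have n10 : c.toNat ≠ 66 := pvToNat_ne h10
  have n11 : c.toNat ≠ 67 := pvToNat_ne h11
  have n12 : c.toNat ≠ 68 := pvToNat_ne h12
  have n13 : c.toNat ≠ 69 := pvToNat_ne h13
  have n14 : c.toNat ≠ 70 := pvToNat_ne h14
  have n15 : c.toNat ≠ 71 := pvToNat_ne h15
  have n16 : c.toNat ≠ 72 := pvToNat_ne h16
  have n17 : c.toNat ≠ 73 := pvToNat_ne h17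
  have n18 : c.toNat ≠ 74 := pvToNat_ne h18
  have n19 : c.toNat ≠ 42 := pvToNat_ne h19
  have n20 : c.toNat ≠ 35 := pvToNat_ne h20
  rw [pvCodeB, if_neg, if_neg, if_neg, if_neg]
  · rfl
  · intro h; rcases h with h | h
    · exact h19 h
    · exact h20 h
  · rw [not_and_or, pvCharLe, pvCharLe]
    show ¬(65 ≤ c.toNat) ∨ ¬(c.toNat ≤ 74)
    omega
  · exact h8
  · rw [not_and_or, pvCharLe, pvCharLe]
    show ¬(50 ≤ c.toNat) ∨ ¬(c.toNat ≤ 57)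
    omega

theorem pvLoopA_eq (chars : List Char) : ∀ (trad succ : String),
    pvLoopA chars trad succ = trad ++ pvEmit (chars.map pvCodeA) succ := by
  induction chars with
  | nil => intro trad succ; simp [pvLoopA, pvEmit, String.append_empty]
  | cons c cs ih =>
    intro trad succ
    have hcode : pvLoopA (c :: cs) trad succ =
        pvLoopA cs (if pvCodeA c == succ then trad ++ ("0" ++ pvCodeA c) else trad ++ pvCodeA c)
          (pvCodeA c) := rfl
    rw [hcode, ih]
    simp only [List.map_cons, pvEmit]
    by_cases hc : (pvCodeA c == succ) = true <;> simp [hc, String.append_assoc]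

theorem pvRuns_nil : pvRuns [] = [] := by
  rw [pvRuns.eq_def]

theorem pvRuns_cons (c : String) (rest : List String) :
    pvRuns (c :: rest)
      = PySem.Str.join "0" (c :: rest.takeWhile (· == c)) :: pvRuns (rest.dropWhile (· == c)) := by
  rw [pvRuns.eq_def]

theorem pvJoin_empty (ps : List String) : PySem.Str.join "" ps = pvCat ps := by
  induction ps with
  | nil =>
    apply String.toList_inj.mp
    simp [PySem.Str.toList_join, PySem.Chars.join_nil, pvCat]
  | cons p ps ih =>
    apply String.toList_inj.mp
    cases ps with
    | nil =>
      simp [PySem.Str.toList_join, PySem.Chars.join_singleton, pvCat, String.append_empty]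
    | cons q qs =>
      have := congrArg String.toList ih
      simp only [PySem.Str.toList_join, pvCat, String.toList_append,
        show ("" : String).toList = [] from rfl] at this ⊢
      simp only [List.map_cons] at this ⊢
      rw [PySem.Chars.join_cons_cons, this]
      simp

theorem pvJoin_zero_cons (c : String) (run : List String) :
    PySem.Str.join "0" (c :: run) = c ++ pvSeps run := by
  induction run generalizing c with
  | nil =>
    apply String.toList_inj.mp
    simp [PySem.Str.toList_join, PySem.Chars.join_singleton, pvSeps, String.append_empty]
  | cons r rs ih =>
    apply String.toList_inj.mp
    have := congrArg String.toList (ih r)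
    simp only [PySem.Str.toList_join, pvSeps, String.toList_append,
      show ("0" : String).toList = ['0'] from rfl] at this ⊢
    simp only [List.map_cons] at this ⊢
    rw [PySem.Chars.join_cons_cons, this]
    simp [List.append_assoc]

theorem pvEmit_runs (cs : List String) : ∀ (c : String),
    pvEmit cs c = pvSeps (cs.takeWhile (· == c)) ++ pvCat (pvRuns (cs.dropWhile (· == c))) := by
  induction cs with
  | nil => intro c; simp [pvEmit, pvRuns_nil, pvCat, pvSeps, String.append_empty]
  | cons d ds ih =>
    intro c
    by_cases hd : (d == c) = true
    · have hdc : d = c := eq_of_beq hd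
      subst hdc
      simp only [pvEmit, List.takeWhile_cons, List.dropWhile_cons, hd, if_pos, pvSeps]
      rw [ih d]
      simp [String.append_assoc]
    · simp only [pvEmit, List.takeWhile_cons, List.dropWhile_cons, hd, if_neg,
        Bool.false_eq_true, not_false_iff, pvSeps, String.empty_append]
      rw [ih d, pvRuns_cons, pvCat, pvJoin_zero_cons, String.append_assoc]

theorem pvCodeA_ne_empty (c : Char) : (pvCodeA c == "") = false := by
  simp only [pvCodeA, PySem.Dict.get?]
  cases h1 : List.find? (fun p => p.1 == String.ofList [c]) pvLettres.items with
  | some p =>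
    have hmem := List.mem_of_find?_eq_some h1
    have hval : ∀ q ∈ pvLettres.items, (q.2 == "") = false := by decide
    simpa using hval p hmem
  | none =>
    cases h2 : List.find? (fun p => p.1 == String.ofList [c]) pvChiffres.items with
    | some p =>
      have hmem := List.mem_of_find?_eq_some h2
      have hval : ∀ q ∈ pvChiffres.items, (q.2 == "") = false := by decide
      simpa using hval p hmem
    | none =>
      cases h3 : List.find? (fun p => p.1 == String.ofList [c]) pvCarac.items with
      | some p =>
        have hmem := List.mem_of_find?_eq_some h3
        have hval : ∀ q ∈ pvCarac.items, (q.2 == "") = false := by decide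
        simpa using hval p hmem
      | none => decide

theorem pvEmit_start (codes : List String)
    (hne : ∀ c ∈ codes, (c == "") = false) :
    pvEmit codes "" = pvCat (pvRuns codes) := by
  cases codes with
  | nil => simp [pvEmit, pvRuns_nil, pvCat]
  | cons c cs =>
    have hc : (c == "") = false := hne c (List.mem_cons_self ..)
    simp only [pvEmit, hc, if_neg, Bool.false_eq_true, not_false_iff]
    rw [pvEmit_runs, pvRuns_cons, pvCat, pvJoin_zero_cons, String.append_assoc]

-- ===== VERDICT (by name: the statement is the Claim_ definition above) =====
theorem lettrem_spec : Claim_equal_lettrem := by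
  intro phrase _
  show lettrem phrase = lettrem_alt phrase
  unfold lettrem lettrem_alt
  rw [pvLoopA_eq, String.empty_append]
  have hmap : ((PySem.Str.upper phrase).toList).map pvCodeB
      = ((PySem.Str.upper phrase).toList).map pvCodeA :=
    List.map_congr_left (fun c _ => (pvCodeAB c).symm)
  rw [hmap, pvJoin_empty, pvEmit_start]
  intro c hc
  rcases List.mem_map.mp hc with ⟨d, _, rfl⟩
  exact pvCodeA_ne_empty d
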